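-- pv_equiv track=rewrite | github.com/Vidyadhari11/chingari-assignment | question5.py | is_handsome_number
-- ===== SOURCE A (Python) =====
-- def get_proper_divisors_count(number):
--
--         count = 0
--         for i in range(1, number + 1):
--             if number % i == 0:
--                 count += 1
--
--         return count
--
-- def fib(devil_numbers,n):
--     if n<=0:
--         return "Number should be greater than 0"
--     devil_numbers[0]=0
--     devil_numbers[1]=1
--     for i in range(2,n):
--         devil_numbers[i]=devil_numbers[i-1]+devil_numbers[i-2]
--
-- def is_handsome_number(b):
--     num_1,num_2=b[0],b[1]
--     count=0
--     for i in range(1,num_1+1):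
--         if num_1%i==0:
--             count+=i
--
--     number=count%num_2
--     devil_numbers=[0]*num_2
--     fib(devil_numbers,num_2)
--     devil_count = get_proper_divisors_count(number)
--     if devil_count in devil_numbers:
--         return "YES."
--     else:
--         return "NO."
-- ===== SOURCE B (Python) =====
-- from math import isqrt
--
-- def _divisor_sum(n):
--     # sum of divisors by pairing i with n // i up to isqrt(n)
--     if n <= 0:
--         return 0
--     s = 0
--     for i in range(1, isqrt(n) + 1):
--         if n % i == 0:
--             j = n // i
--             s += i if j == i else i + j
--     return s
--
-- def _divisor_count(n):
--     if n <= 0: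
--         return 0
--     c = 0
--     for i in range(1, isqrt(n) + 1):
--         if n % i == 0:
--             c += 1 if n // i == i else 2
--     return c
--
-- def is_handsome_number(b):
--     num_1, num_2 = b[0], b[1]
--     number = _divisor_sum(num_1) % num_2
--     dc = _divisor_count(number)
--     a, fb, i = 0, 1, 0
--     while i < num_2:
--         if a == dc:
--             return "YES."
--         if a > dc:
--             return "NO."
--         a, fb = fb, a + fb
--         i += 1
--     return "NO."
-- ===== Notes on version B (the rewrite author's own statement) =====
-- stated objective: faster
-- what changed: B enumerates divisors only up to isqrt, pairing each divisor i with num_1//i, for both the divisor sum and the divisor count, and replaces the materialised fibonacci list of length num_2 by an early-stopping fibonacci walk that never stores the list.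
import Mathlib
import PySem

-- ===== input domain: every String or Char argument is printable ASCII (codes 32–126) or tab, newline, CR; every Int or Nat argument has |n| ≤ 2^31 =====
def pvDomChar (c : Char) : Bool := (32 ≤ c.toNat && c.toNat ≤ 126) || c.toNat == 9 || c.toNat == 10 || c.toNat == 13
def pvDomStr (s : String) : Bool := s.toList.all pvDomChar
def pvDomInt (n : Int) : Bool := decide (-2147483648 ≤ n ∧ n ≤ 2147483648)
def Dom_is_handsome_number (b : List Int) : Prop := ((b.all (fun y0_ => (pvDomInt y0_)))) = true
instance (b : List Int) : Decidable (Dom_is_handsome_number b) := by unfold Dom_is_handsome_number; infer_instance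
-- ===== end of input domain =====

-- B replaces A's two linear divisor scans (up to num_1 and up to number) by sqrt-bounded
-- divisor-pair enumeration, and replaces A's materialised fibonacci list of length num_2
-- by an early-stopping fibonacci walk; A's in-place mutation of its local list is not observable.

-- ===== PORT A =====
def getProperDivisorsCount (number : Int) : Int :=
  (PySem.List.pyRange 1 (number + 1) 1).foldl
    (fun count i => if PySem.Int.mod number i = 0 then count + 1 else count) 0

-- Python's fib mutates devil_numbers in place and its return value is ignored;
-- ported as returning the updated list.  The writes devil_numbers[i] = … always use
-- nonnegative in-range indices on admitted inputs, so List.set i.toNat is exact there.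
def fibA (devil_numbers : List Int) (n : Int) : List Int :=
  if n ≤ 0 then devil_numbers
  else
    (PySem.List.pyRange 2 n 1).foldl
      (fun d i => d.set i.toNat (PySem.List.pyGetD d (i - 1) 0 + PySem.List.pyGetD d (i - 2) 0))
      (((devil_numbers.set 0 0).set 1 1))

def is_handsome_number (b : List Int) : String :=
  let num_1 := PySem.List.pyGetD b 0 0
  let num_2 := PySem.List.pyGetD b 1 0
  let count := (PySem.List.pyRange 1 (num_1 + 1) 1).foldl
      (fun c i => if PySem.Int.mod num_1 i = 0 then c + i else c) 0
  let number := PySem.Int.mod count num_2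
  let devil_numbers := List.replicate num_2.toNat 0
  let dl := fibA devil_numbers num_2
  let devil_count := getProperDivisorsCount number
  if devil_count ∈ dl then "YES." else "NO."

-- ===== PORT B =====
-- math.isqrt ported by hand as a structural linear search (kernel-transparent);
-- isqrtNat_eq_sqrt below proves it exact.
def isqrtGo (n : Nat) (fuel : Nat) (i : Nat) : Nat :=
  match fuel with
  | 0 => i
  | fuel + 1 => if (i + 1) * (i + 1) ≤ n then isqrtGo n fuel (i + 1) else i

def isqrtNat (n : Nat) : Nat := isqrtGo n n 0

def divisorSumAlt (n : Int) : Int :=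
  if n ≤ 0 then 0
  else
    (PySem.List.pyRange 1 ((isqrtNat n.toNat : Int) + 1) 1).foldl
      (fun s i =>
        if PySem.Int.mod n i = 0 then
          if PySem.Int.floordiv n i = i then s + i else s + (i + PySem.Int.floordiv n i)
        else s) 0

def divisorCountAlt (n : Int) : Int :=
  if n ≤ 0 then 0
  else
    (PySem.List.pyRange 1 ((isqrtNat n.toNat : Int) + 1) 1).foldl
      (fun c i =>
        if PySem.Int.mod n i = 0 then
          if PySem.Int.floordiv n i = i then c + 1 else c + 2
        else c) 0

-- the while-loop, ported with fuel (num_2 - i).toNat = the exact number of remaining iterations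
def fibSearchGo (dc : Int) (fuel : Nat) (a fb i num_2 : Int) : String :=
  match fuel with
  | 0 => "NO."
  | fuel + 1 =>
    if i < num_2 then
      if a = dc then "YES."
      else if dc < a then "NO."
      else fibSearchGo dc fuel fb (a + fb) (i + 1) num_2
    else "NO."

def fibSearch (dc : Int) (a fb i num_2 : Int) : String :=
  fibSearchGo dc (num_2 - i).toNat a fb i num_2

def is_handsome_number_alt (b : List Int) : String :=
  let num_1 := PySem.List.pyGetD b 0 0
  let num_2 := PySem.List.pyGetD b 1 0
  let number := PySem.Int.mod (divisorSumAlt num_1) num_2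
  let dc := divisorCountAlt number
  fibSearch dc 0 1 0 num_2

-- ===== PRECONDITION & SPEC =====
-- Pre_ excludes exactly the inputs on which A raises: fewer than two elements (IndexError
-- on b[1]), b[1] = 0 (ZeroDivisionError in count % num_2), b[1] = 1 (IndexError in fib).
def Pre_is_handsome_number (b : List Int) : Prop :=
  2 ≤ b.length ∧ b.getD 1 0 ≠ 0 ∧ b.getD 1 0 ≠ 1
instance (b : List Int) : Decidable (Pre_is_handsome_number b) := by
  unfold Pre_is_handsome_number; infer_instance

def pvWitness_is_handsome_number : List Int := [28, 7]

def Spec_is_handsome_number (b : List Int) (out : String) : Prop := out = is_handsome_number_alt b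
instance (b : List Int) (out : String) : Decidable (Spec_is_handsome_number b out) := by
  unfold Spec_is_handsome_number; infer_instance

-- ===== CLAIM (what is proved, stated in full; the proofs are below) =====
def Claim_equal_is_handsome_number : Prop := ∀ (b : List Int), Dom_is_handsome_number b → Pre_is_handsome_number b → Spec_is_handsome_number b (is_handsome_number b)

-- ===== LEMMAS AND PROOFS =====

def fibZ (k : Nat) : Int := (Nat.fib k : Int)

theorem isqrtGo_spec (n : Nat) (fuel : Nat) (i : Nat) (h1 : i * i ≤ n)
    (h2 : n < (i + fuel + 1) * (i + fuel + 1)) :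
    isqrtGo n fuel i * isqrtGo n fuel i ≤ n ∧ n < (isqrtGo n fuel i + 1) * (isqrtGo n fuel i + 1) := by
  induction fuel generalizing i with
  | zero => simpa [isqrtGo] using ⟨h1, by omega⟩
  | succ f ih =>
    simp only [isqrtGo]
    split_ifs with h
    · exact ih (i + 1) h (by nlinarith)
    · exact ⟨h1, by omega⟩

theorem isqrtNat_eq_sqrt (n : Nat) : isqrtNat n = Nat.sqrt n := by
  have h := isqrtGo_spec n n 0 (by omega) (by nlinarith)
  have h1 : isqrtGo n n 0 ≤ Nat.sqrt n := Nat.le_sqrt.mpr h.1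
  have h2 : Nat.sqrt n < isqrtGo n n 0 + 1 := Nat.sqrt_lt.mpr h.2
  unfold isqrtNat; omega

theorem map_range_sum (h : Nat → Int) (m : Nat) :
    ((List.range m).map h).sum = ∑ k ∈ Finset.range m, h k := by
  induction m with
  | zero => simp
  | succ m ih => rw [List.range_succ]; simp [ih, Finset.sum_range_succ]

theorem pyfold_sum (X : Nat) (P : Int → Prop) [DecidablePred P] (f : Int → Int) :
    (PySem.List.pyRange 1 ((X : Int) + 1) 1).foldl (fun c i => if P i then c + f i else c) 0
      = ∑ k ∈ Finset.Ico 1 (X + 1), (if P (k : Int) then f (k : Int) else 0) := by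
  rw [PySem.List.foldl_congr_mem _ _ (fun c i => c + (if P i then f i else 0)) 0
      (by intro acc x _; split_ifs with h <;> simp [h])]
  rw [PySem.List.foldl_add, PySem.List.pyRange_one, List.map_map, zero_add]
  have : ((X : Int) + 1 - 1).toNat = X := by omega
  rw [this, map_range_sum, Finset.sum_Ico_eq_sum_range]
  have : X + 1 - 1 = X := by omega
  rw [this]
  apply Finset.sum_congr rfl
  intro k _
  simp only [Function.comp]
  push_cast
  rfl


theorem sqrt_pairing (n : Nat) (hn : 1 ≤ n) (f : Nat → Int) :
    ∑ i ∈ (Finset.Ico 1 (n + 1)).filter (· ∣ n), f i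
      = ∑ i ∈ Finset.Ico 1 (n.sqrt + 1),
          (if i ∣ n then (if n / i = i then f i else f i + f (n / i)) else 0) := by
  have hss : n.sqrt * n.sqrt ≤ n := by simpa [pow_two] using Nat.sqrt_le' n
  have hlt : n < (n.sqrt + 1) * (n.sqrt + 1) := by
    simpa [pow_two, Nat.succ_eq_add_one] using Nat.lt_succ_sqrt' n
  set s := n.sqrt with hs
  set D := (Finset.Ico 1 (n + 1)).filter (· ∣ n) with hD
  have memD : ∀ i, i ∈ D ↔ i ∣ n ∧ 1 ≤ i ∧ i ≤ n := by
    intro i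
    simp only [hD, Finset.mem_filter, Finset.mem_Ico]
    constructor
    · rintro ⟨⟨a, b⟩, c⟩; exact ⟨c, a, by omega⟩
    · rintro ⟨c, a, b⟩; exact ⟨⟨a, by omega⟩, c⟩
  have small_of_large : ∀ i, 1 ≤ i → s < i → n / i ≤ s := by
    intro i h1 h2
    have ha : n / (s + 1) < s + 1 := Nat.div_lt_of_lt_mul (by omega)
    have hb : n / i ≤ n / (s + 1) := Nat.div_le_div_left (by omega) (by omega)
    omega
  have large_of_small : ∀ i, i ∣ n → 1 ≤ i → i ≤ s → n / i ≠ i → s < n / i := by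
    intro i hdvd h1 h2 hne
    obtain ⟨q, hq⟩ := hdvd
    have hq' : n / i = q := by rw [hq]; exact Nat.mul_div_cancel_left q (by omega)
    rw [hq'] at hne ⊢
    by_contra hc
    push_neg at hc
    have hi : i = s := by nlinarith
    have hqs : q = s := by nlinarith
    omega
  have div_pos' : ∀ i, i ∣ n → 1 ≤ i → i ≤ n → 1 ≤ n / i := fun i hd h1 h2 => Nat.div_pos h2 (by omega)
  have hbij : ∑ i ∈ D.filter (fun i => ¬ i ≤ s), f i
      = ∑ i ∈ (D.filter (fun i => i ≤ s)).filter (fun i => ¬ n / i = i), f (n / i) := by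
    apply Finset.sum_nbij' (i := fun i => n / i) (j := fun i => n / i)
    · intro i hi
      simp only [Finset.mem_filter, memD] at hi ⊢
      obtain ⟨⟨hdvd, h1, hle⟩, hbig⟩ := hi
      have hsm := small_of_large i h1 (by omega)
      have hdd := Nat.div_div_self hdvd (by omega)
      refine ⟨⟨⟨Nat.div_dvd_of_dvd hdvd, div_pos' i hdvd h1 hle, Nat.div_le_self n i⟩, hsm⟩, ?_⟩
      rw [hdd]; omega
    · intro i hi
      simp only [Finset.mem_filter, memD] at hi ⊢
      obtain ⟨⟨⟨hdvd, h1, hle⟩, hsm⟩, hne⟩ := hi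
      refine ⟨⟨Nat.div_dvd_of_dvd hdvd, div_pos' i hdvd h1 hle, Nat.div_le_self n i⟩, ?_⟩
      have := large_of_small i hdvd h1 hsm hne
      omega
    · intro i hi
      simp only [Finset.mem_filter, memD] at hi
      exact Nat.div_div_self hi.1.1 (by omega)
    · intro i hi
      simp only [Finset.mem_filter, memD] at hi
      exact Nat.div_div_self hi.1.1.1 (by omega)
    · intro i hi
      simp only [Finset.mem_filter, memD] at hi
      rw [Nat.div_div_self hi.1.1 (by omega)]
  rw [← Finset.sum_filter_add_sum_filter_not D (fun i => i ≤ s), hbij,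
    Finset.sum_filter (fun i => ¬ n / i = i) (fun i => f (n / i)), ← Finset.sum_add_distrib]
  have hsets : D.filter (fun i => i ≤ s) = (Finset.Ico 1 (s + 1)).filter (· ∣ n) := by
    apply Finset.ext
    intro i
    simp only [Finset.mem_filter, memD, Finset.mem_Ico]
    constructor
    · rintro ⟨⟨hd, h1, h2⟩, h3⟩; exact ⟨⟨h1, by omega⟩, hd⟩
    · rintro ⟨⟨h1, h2⟩, hd⟩
      exact ⟨⟨hd, h1, Nat.le_of_dvd (by omega) hd⟩, by omega⟩
  rw [hsets, Finset.sum_filter]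
  apply Finset.sum_congr rfl
  intro i hi
  by_cases hd : i ∣ n
  · simp only [hd, if_pos]
    by_cases he : n / i = i <;> simp [he]
  · simp [hd]

theorem mod_zero_iff (n k : Nat) (hk : 1 ≤ k) :
    (PySem.Int.mod (n : Int) (k : Int) = 0) ↔ k ∣ n := by
  rw [PySem.Int.mod_natCast, Nat.cast_eq_zero]
  omega

theorem ico_sum_dvd (n : Nat) (fI : Int → Int) :
    (∑ k ∈ Finset.Ico 1 (n + 1), (if PySem.Int.mod (n : Int) (k : Int) = 0 then fI (k : Int) else 0))
      = ∑ k ∈ (Finset.Ico 1 (n + 1)).filter (· ∣ n), fI (k : Int) := by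
  rw [Finset.sum_filter]
  apply Finset.sum_congr rfl
  intro k hk
  simp only [Finset.mem_Ico] at hk
  rw [if_congr (mod_zero_iff n k (by omega)) rfl rfl]

theorem sqrt_side_eq (n : Nat) (hn : 1 ≤ n) (fN : Nat → Int) (F : Int → Int)
    (hF : ∀ k : Nat, 1 ≤ k → k ∣ n →
        F (k : Int) = (if n / k = k then fN k else fN k + fN (n / k))) :
    (∑ k ∈ Finset.Ico 1 (n.sqrt + 1), (if PySem.Int.mod (n : Int) (k : Int) = 0 then F (k : Int) else 0))
      = ∑ i ∈ Finset.Ico 1 (n.sqrt + 1),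
          (if i ∣ n then (if n / i = i then fN i else fN i + fN (n / i)) else 0) := by
  apply Finset.sum_congr rfl
  intro k hk
  simp only [Finset.mem_Ico] at hk
  rw [if_congr (mod_zero_iff n k (by omega)) rfl rfl]
  by_cases hd : k ∣ n
  · rw [if_pos hd, if_pos hd, hF k (by omega) hd]
  · rw [if_neg hd, if_neg hd]

theorem divisorSum_eq (m : Int) :
    (PySem.List.pyRange 1 (m + 1) 1).foldl
      (fun c i => if PySem.Int.mod m i = 0 then c + i else c) 0 = divisorSumAlt m := by
  by_cases hm : m ≤ 0
  · rw [PySem.List.pyRange_one_eq_nil (by omega)]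
    simp [divisorSumAlt, hm]
  · push_neg at hm
    set n := m.toNat with hn
    have hmn : (n : Int) = m := Int.toNat_of_nonneg (by omega)
    have hn1 : 1 ≤ n := by omega
    rw [divisorSumAlt, if_neg (by omega), isqrtNat_eq_sqrt, ← hmn]
    simp only [Int.toNat_natCast]
    rw [PySem.List.foldl_congr_mem (PySem.List.pyRange 1 ((n.sqrt : Int) + 1) 1) _
        (fun c i => if PySem.Int.mod (n : Int) i = 0 then c +
          (if PySem.Int.floordiv (n : Int) i = i then i else i + PySem.Int.floordiv (n : Int) i) else c) 0
        (by intro acc x _; beta_reduce; split_ifs <;> rfl)]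
    rw [pyfold_sum n.sqrt (fun i => PySem.Int.mod (n : Int) i = 0)
        (fun i => if PySem.Int.floordiv (n : Int) i = i then i else i + PySem.Int.floordiv (n : Int) i)]
    rw [pyfold_sum n (fun i => PySem.Int.mod (n : Int) i = 0) (fun i => i)]
    rw [ico_sum_dvd n (fun i => i), sqrt_pairing n hn1 (fun k => (k : Int))]
    refine (sqrt_side_eq n hn1 (fun k => (k : Int))
        (fun i => if PySem.Int.floordiv (n : Int) i = i then i else i + PySem.Int.floordiv (n : Int) i) ?_).symm
    intro k h1 hd
    beta_reduce
    simp only [PySem.Int.floordiv_natCast]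
    by_cases he : n / k = k
    · rw [if_pos he, if_pos (congrArg (Nat.cast : Nat → Int) he)]
    · rw [if_neg he, if_neg (fun hc => he (Nat.cast_injective hc))]

theorem divisorCount_eq (m : Int) : getProperDivisorsCount m = divisorCountAlt m := by
  rw [getProperDivisorsCount]
  by_cases hm : m ≤ 0
  · rw [PySem.List.pyRange_one_eq_nil (by omega)]
    simp [divisorCountAlt, hm]
  · push_neg at hm
    set n := m.toNat with hn
    have hmn : (n : Int) = m := Int.toNat_of_nonneg (by omega)
    have hn1 : 1 ≤ n := by omega
    rw [divisorCountAlt, if_neg (by omega), isqrtNat_eq_sqrt, ← hmn]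
    simp only [Int.toNat_natCast]
    rw [PySem.List.foldl_congr_mem (PySem.List.pyRange 1 ((n.sqrt : Int) + 1) 1) _
        (fun c i => if PySem.Int.mod (n : Int) i = 0 then c +
          (if PySem.Int.floordiv (n : Int) i = i then 1 else 2) else c) 0
        (by intro acc x _; beta_reduce; split_ifs <;> rfl)]
    rw [pyfold_sum n.sqrt (fun i => PySem.Int.mod (n : Int) i = 0)
        (fun i => if PySem.Int.floordiv (n : Int) i = i then 1 else 2)]
    rw [pyfold_sum n (fun i => PySem.Int.mod (n : Int) i = 0) (fun _ => 1)]
    rw [ico_sum_dvd n (fun _ => 1), sqrt_pairing n hn1 (fun _ => (1 : Int))]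
    refine (sqrt_side_eq n hn1 (fun _ => (1 : Int))
        (fun i => if PySem.Int.floordiv (n : Int) i = i then 1 else 2) ?_).symm
    intro k h1 hd
    beta_reduce
    simp only [PySem.Int.floordiv_natCast]
    by_cases he : n / k = k
    · rw [if_pos he, if_pos (congrArg (Nat.cast : Nat → Int) he)]
    · rw [if_neg he, if_neg (fun hc => he (Nat.cast_injective hc))]
      norm_num

theorem fib_fold_inv (t : Nat) (ht : 2 ≤ t) (k : Nat) (hk : k ≤ t - 2) :
    (PySem.List.pyRange 2 ((2 + k : Nat) : Int) 1).foldl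
      (fun d i => d.set i.toNat (PySem.List.pyGetD d (i - 1) 0 + PySem.List.pyGetD d (i - 2) 0))
      ((List.range 2).map fibZ ++ List.replicate (t - 2) 0)
    = (List.range (2 + k)).map fibZ ++ List.replicate (t - 2 - k) 0 := by
  induction k with
  | zero =>
    rw [PySem.List.pyRange_one_eq_nil (by omega)]
    rfl
  | succ k ih =>
    have hk' : k ≤ t - 2 := by omega
    have hcast : ((2 + (k + 1) : Nat) : Int) = ((2 + k : Nat) : Int) + 1 := by push_cast; ring
    rw [hcast, PySem.List.pyRange_one_succ_right (by exact_mod_cast by omega), List.foldl_append,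
      ih hk']
    simp only [List.foldl_cons, List.foldl_nil]
    have hlen : ((List.range (2 + k)).map fibZ).length = 2 + k := by simp
    have h1 : ((2 + k : Nat) : Int) - 1 = ((k + 1 : Nat) : Int) := by push_cast; ring
    have h2 : ((2 + k : Nat) : Int) - 2 = ((k : Nat) : Int) := by push_cast; ring
    rw [h1, h2, PySem.List.pyGetD_natCast, PySem.List.pyGetD_natCast]
    have hrep : List.replicate (t - 2 - k) (0 : Int) = 0 :: List.replicate (t - 2 - (k + 1)) 0 := by
      have : t - 2 - k = (t - 2 - (k + 1)) + 1 := by omega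
      rw [this, List.replicate_succ]
    have hgd1 : (((List.range (2 + k)).map fibZ ++ List.replicate (t - 2 - k) 0).getD (k + 1) 0) = fibZ (k + 1) := by
      rw [List.getD_eq_getElem _ _ (by simp; omega), List.getElem_append_left (by omega)]
      simp
    have hgd2 : (((List.range (2 + k)).map fibZ ++ List.replicate (t - 2 - k) 0).getD k 0) = fibZ k := by
      rw [List.getD_eq_getElem _ _ (by simp; omega), List.getElem_append_left (by omega)]
      simp
    rw [hgd1, hgd2]
    simp only [Int.toNat_natCast]
    rw [hrep]
    have hset : ((List.range (2 + k)).map fibZ ++ 0 :: List.replicate (t - 2 - (k + 1)) 0).set (2 + k)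
          (fibZ (k + 1) + fibZ k)
        = (List.range (2 + k)).map fibZ ++ (fibZ (k + 1) + fibZ k) :: List.replicate (t - 2 - (k + 1)) 0 := by
      rw [List.set_append_right (2 + k) (fibZ (k + 1) + fibZ k) (by simp)]
      simp
    rw [hset]
    rw [show 2 + (k + 1) = (2 + k) + 1 by omega, List.range_succ, List.map_append,
      List.append_assoc]
    simp only [List.map_cons, List.map_nil, List.singleton_append, List.cons_append,
      List.nil_append]
    congr 2
    · simp [fibZ]
      rw [show 2 + k = k + 2 by omega, Nat.fib_add_two]
      push_cast; ring

theorem fibA_eq (n2 : Int) (h : 2 ≤ n2) :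
    fibA (List.replicate n2.toNat 0) n2 = (List.range n2.toNat).map fibZ := by
  set t := n2.toNat with ht
  have htn : (t : Int) = n2 := by omega
  have ht2 : 2 ≤ t := by omega
  rw [fibA, if_neg (by omega)]
  have hinit : ((List.replicate t (0 : Int)).set 0 0).set 1 1
      = (List.range 2).map fibZ ++ List.replicate (t - 2) 0 := by
    obtain ⟨u, hu⟩ := Nat.exists_eq_add_of_le ht2
    have hu2 : t - 2 = u := by omega
    rw [hu2, hu, List.replicate_add]
    simp [fibZ, List.range_succ]
  rw [hinit, ← htn, show (t : Int) = ((2 + (t - 2) : Nat) : Int) by omega,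
    fib_fold_inv t ht2 (t - 2) (le_refl _)]
  rw [show 2 + (t - 2) = t by omega]
  simp

theorem go_spec (dc n2 : Int) (fuel : Nat) : ∀ (k : Nat), fuel = (n2 - k).toNat →
    (fibSearchGo dc fuel (fibZ k) (fibZ (k + 1)) (k : Int) n2 = "YES."
        ↔ ∃ j : Nat, k ≤ j ∧ (j : Int) < n2 ∧ fibZ j = dc)
    ∧ (fibSearchGo dc fuel (fibZ k) (fibZ (k + 1)) (k : Int) n2 = "YES."
        ∨ fibSearchGo dc fuel (fibZ k) (fibZ (k + 1)) (k : Int) n2 = "NO.") := by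
  induction fuel with
  | zero =>
    intro k hf
    have hk : n2 ≤ k := by omega
    refine ⟨⟨fun hc => absurd hc (by simp [fibSearchGo]), ?_⟩, Or.inr rfl⟩
    rintro ⟨j, hj1, hj2, _⟩
    have : ((k : Int)) ≤ j := by exact_mod_cast hj1
    omega
  | succ fuel ih =>
    intro k hf
    have hklt : (k : Int) < n2 := by omega
    simp only [fibSearchGo, if_pos hklt]
    by_cases he : fibZ k = dc
    · simp only [he, if_pos rfl]
      exact ⟨⟨fun _ => ⟨k, le_refl _, hklt, he⟩, fun _ => rfl⟩, Or.inl rfl⟩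
    · rw [if_neg he]
      by_cases hgt : dc < fibZ k
      · rw [if_pos hgt]
        refine ⟨⟨fun hc => absurd hc (by simp), ?_⟩, Or.inr rfl⟩
        rintro ⟨j, hj1, hj2, hj3⟩
        have : fibZ k ≤ fibZ j := by
          simp only [fibZ, Nat.cast_le]
          exact Nat.fib_mono hj1
        omega
      · rw [if_neg hgt]
        have harg : fibZ k + fibZ (k + 1) = fibZ (k + 2) := by
          simp only [fibZ]
          rw [Nat.fib_add_two]
          push_cast; ring
        have hcast : (k : Int) + 1 = ((k + 1 : Nat) : Int) := by push_cast; ring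
        rw [harg, hcast, show k + 2 = (k + 1) + 1 by omega]
        have hf' : fuel = (n2 - ((k + 1 : Nat) : Int)).toNat := by push_cast; omega
        obtain ⟨hiff, hor⟩ := ih (k + 1) hf'
        refine ⟨⟨fun hc => ?_, fun hex => ?_⟩, hor⟩
        · obtain ⟨j, hj1, hj2, hj3⟩ := hiff.mp hc
          exact ⟨j, by omega, hj2, hj3⟩
        · apply hiff.mpr
          obtain ⟨j, hj1, hj2, hj3⟩ := hex
          rcases Nat.eq_or_lt_of_le hj1 with heq | hlt
          · exact absurd (heq ▸ hj3) he
          · exact ⟨j, by omega, hj2, hj3⟩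

theorem fib_block_eq (dc n2 : Int) (h : 2 ≤ n2) :
    (if dc ∈ fibA (List.replicate n2.toNat 0) n2 then "YES." else "NO.")
      = fibSearch dc 0 1 0 n2 := by
  rw [fibA_eq n2 h]
  have h0 : (0 : Int) = fibZ 0 := by simp [fibZ]
  have h1 : (1 : Int) = fibZ 1 := by simp [fibZ]
  have hz : (0 : Int) = ((0 : Nat) : Int) := rfl
  rw [fibSearch, h0, h1]
  obtain ⟨hiff, hor⟩ := go_spec dc n2 ((n2 - 0).toNat) 0 (by norm_num)
  simp only [Nat.cast_zero] at hiff hor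
  by_cases hmem : dc ∈ (List.range n2.toNat).map fibZ
  · rw [if_pos hmem]
    obtain ⟨j, hj, hje⟩ := List.mem_map.mp hmem
    have hjlt : j < n2.toNat := List.mem_range.mp hj
    exact (hiff.mpr ⟨j, by omega, by omega, hje⟩).symm
  · rw [if_neg hmem]
    rcases hor with hyes | hno
    · obtain ⟨j, _, hj2, hj3⟩ := hiff.mp hyes
      exact absurd (List.mem_map.mpr ⟨j, List.mem_range.mpr (by omega), hj3⟩) hmem
    · exact hno.symm

-- ===== VERDICT (by name: the statement is the Claim_ definition above) =====
theorem is_handsome_number_spec : Claim_equal_is_handsome_number := by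
  intro b _ hpre
  obtain ⟨hlen, h0, h1⟩ := hpre
  unfold Spec_is_handsome_number
  simp only [is_handsome_number, is_handsome_number_alt]
  rw [divisorSum_eq (PySem.List.pyGetD b 0 0), divisorCount_eq]
  set n2 := PySem.List.pyGetD b 1 0 with hn2
  have hn2v : n2 = b.getD 1 0 := by rw [hn2, PySem.List.pyGetD_ofNat' b 1 0]
  have hne0 : n2 ≠ 0 := hn2v ▸ h0
  have hne1 : n2 ≠ 1 := hn2v ▸ h1
  by_cases hc : 2 ≤ n2
  · exact fib_block_eq _ n2 hc
  · have hneg : n2 < 0 := by omega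
    rw [show n2.toNat = 0 by omega]
    simp only [fibA, fibSearch, if_pos (show n2 ≤ 0 by omega), sub_zero,
      show n2.toNat = 0 by omega]
    simp [fibSearchGo]
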